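-- pv_equiv track=rewrite | github.com/MathisBD/ReversePy | offline/trace_info.py | max_align
-- ===== SOURCE A (Python) =====
-- def max_align(vals):
--     def is_aligned(vals, d):
--         for v in vals:
--             if v is not None and v % d != 0:
--                 return False
--         return True
--     def only_zeros(vals):
--         for v in vals:
--             if v != 0:
--                 return False
--         return True
--     # edge cases
--     if len(vals) == 0:
--         return 0
--     if len(set(vals)) == 1 and vals[0] is None:
--         return 0
--     if only_zeros(vals):
--         return 0
--     # main loop
--     d = 1
--     while d <= 64:
--         if is_aligned(vals, 2*d):
--             d *= 2
--         else:
--             return d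
--     return d
-- ===== SOURCE B (Python) =====
-- def max_align(vals):
--     # One pass: min over non-None values of each value's own largest power of 2 <= 128 dividing it.
--     best = None
--     all_zero = True
--     for v in vals:
--         if v != 0:
--             all_zero = False
--         if v is None:
--             continue
--         p = 128
--         while p > 1 and v % p != 0:
--             p //= 2
--         if best is None or p < best:
--             best = p
--     if best is None or all_zero:
--         return 0
--     return best
-- ===== Notes on version B (the rewrite author's own statement) =====
-- stated objective: alternative
-- what changed: Instead of A's outer loop over divisors with an inner scan of the whole list per divisor, B makes one pass over the values, computes each value's own largest dividing power of two (its 2-adic valuation capped at 128) and returns the running minimum.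
import Mathlib
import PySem

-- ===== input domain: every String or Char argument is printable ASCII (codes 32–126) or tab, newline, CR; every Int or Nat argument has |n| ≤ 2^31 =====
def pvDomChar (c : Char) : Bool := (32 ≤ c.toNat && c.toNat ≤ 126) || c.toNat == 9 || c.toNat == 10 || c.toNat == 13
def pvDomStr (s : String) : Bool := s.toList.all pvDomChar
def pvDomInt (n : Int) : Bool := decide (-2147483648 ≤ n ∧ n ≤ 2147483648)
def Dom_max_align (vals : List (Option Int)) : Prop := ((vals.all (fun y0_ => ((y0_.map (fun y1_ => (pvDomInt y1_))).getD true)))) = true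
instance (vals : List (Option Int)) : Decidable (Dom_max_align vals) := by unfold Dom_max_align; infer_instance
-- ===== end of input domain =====

-- B replaces A's divisor-outer loop (scan the whole list once per candidate divisor) by a single
-- pass taking the minimum of each non-None value's own largest dividing power of two (alternative
-- decomposition, same asymptotic cost).

-- ===== PORT A =====
-- inner helper is_aligned(vals, d)
def pvIsAligned (vals : List (Option Int)) (d : Int) : Bool :=
  match vals with
  | [] => true
  | v :: rest =>
    match v with
    | some x => if PySem.Int.mod x d ≠ 0 then false else pvIsAligned rest d
    | none => pvIsAligned rest d

-- inner helper only_zeros(vals)  (note: a None element makes it False, as in Python None != 0)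
def pvOnlyZeros (vals : List (Option Int)) : Bool :=
  match vals with
  | [] => true
  | v :: rest => if v ≠ some 0 then false else pvOnlyZeros rest

-- the 'while d <= 64' loop; d doubles from 1, so 7 iterations of fuel always suffice
def pvMainLoop (vals : List (Option Int)) (d : Int) (fuel : Nat) : Int :=
  match fuel with
  | 0 => d
  | f + 1 =>
    if d ≤ 64 then
      if pvIsAligned vals (2 * d) then pvMainLoop vals (2 * d) f else d
    else d

def max_align (vals : List (Option Int)) : Int :=
  if vals.length = 0 then 0
  else if (PySem.Set.ofList vals).length = 1 ∧ vals.head? = some none then 0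
  else if pvOnlyZeros vals then 0
  else pvMainLoop vals 1 7

-- ===== PORT B =====
-- per-value inner 'while p > 1 and v % p != 0: p //= 2' loop; p halves from 128, 7 steps suffice
def pvValLoop (x p : Int) (fuel : Nat) : Int :=
  match fuel with
  | 0 => p
  | f + 1 => if 1 < p ∧ PySem.Int.mod x p ≠ 0 then pvValLoop x (PySem.Int.floordiv p 2) f else p

def pvVal (x : Int) : Int := pvValLoop x 128 7

-- one iteration of B's single pass: state = (best, all_zero)
def pvStep (st : Option Int × Bool) (v : Option Int) : Option Int × Bool :=
  let z := if v ≠ some 0 then false else st.2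
  match v with
  | none => (st.1, z)
  | some x =>
    let p := pvVal x
    match st.1 with
    | none => (some p, z)
    | some b => (some (if p < b then p else b), z)

def max_align_alt (vals : List (Option Int)) : Int :=
  match vals.foldl pvStep (none, true) with
  | (none, _) => 0
  | (some b, z) => if z then 0 else b

-- ===== PRECONDITION & SPEC =====
def Spec_max_align (vals : List (Option Int)) (out : Int) : Prop := out = max_align_alt vals
instance (vals : List (Option Int)) (out : Int) : Decidable (Spec_max_align vals out) := by unfold Spec_max_align; infer_instance

-- ===== CLAIM (what is proved, stated in full; the proofs are below) =====
def Claim_equal_max_align : Prop := ∀ (vals : List (Option Int)), Dom_max_align vals → Spec_max_align vals (max_align vals)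

-- ===== LEMMAS AND PROOFS =====

-- B's valuation loop, fully evaluated into its divisibility table
lemma pvVal_table (x : Int) : pvVal x =
    (if (128:Int) ∣ x then 128 else if (64:Int) ∣ x then 64 else if (32:Int) ∣ x then 32
     else if (16:Int) ∣ x then 16 else if (8:Int) ∣ x then 8 else if (4:Int) ∣ x then 4
     else if (2:Int) ∣ x then 2 else 1) := by
  simp only [pvVal, pvValLoop]
  norm_num
  split_ifs <;> omega

lemma pvIsAligned_iff (vals : List (Option Int)) (d : Int) :
    pvIsAligned vals d = true ↔ ∀ x ∈ vals.filterMap id, d ∣ x := by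
  induction vals with
  | nil => simp [pvIsAligned]
  | cons v rest ih =>
    cases v with
    | none => simpa [pvIsAligned] using ih
    | some x =>
      by_cases h : PySem.Int.mod x d = 0
      · have hd : d ∣ x := (PySem.Int.mod_eq_zero_iff_dvd x d).mp h
        simp [pvIsAligned, h, ih, hd]
      · have hd : ¬ d ∣ x := fun hh => h ((PySem.Int.mod_eq_zero_iff_dvd x d).mpr hh)
        simp [pvIsAligned, h, hd]

lemma pvOnlyZeros_iff (vals : List (Option Int)) :
    pvOnlyZeros vals = true ↔ ∀ v ∈ vals, v = some 0 := by
  induction vals with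
  | nil => simp [pvOnlyZeros]
  | cons v rest ih =>
    by_cases h : v = some 0
    · simp [pvOnlyZeros, h, ih]
    · simp [pvOnlyZeros, h]

-- accumulator shape of B's running minimum
def pvOMin (a : Option Int) (p : Int) : Option Int :=
  some (match a with | none => p | some b => if p < b then p else b)

lemma fold_fst : ∀ (vals : List (Option Int)) (o : Option Int) (z : Bool),
    (vals.foldl pvStep (o, z)).1
      = (vals.filterMap id).foldl (fun a x => pvOMin a (pvVal x)) o := by
  intro vals
  induction vals with
  | nil => intro o z; rfl
  | cons v rest ih =>
    intro o z
    cases v with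
    | none => simpa [pvStep] using ih o _
    | some x =>
      cases o with
      | none => simpa [pvStep, pvOMin] using ih _ _
      | some b => simpa [pvStep, pvOMin] using ih _ _

lemma fold_snd : ∀ (vals : List (Option Int)) (o : Option Int) (z : Bool),
    (vals.foldl pvStep (o, z)).2 = (z && vals.all (fun v => v == some 0)) := by
  intro vals
  induction vals with
  | nil => intro o z; simp
  | cons v rest ih =>
    intro o z
    by_cases h : v = some 0
    · subst h
      cases o with
      | none => simpa [pvStep] using ih _ z
      | some b => simpa [pvStep] using ih _ z
    · have h2 : ((v == some 0) : Bool) = false := by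
        simpa using h
      cases v with
      | none => cases o <;> simp [pvStep, ih _ false, h2]
      | some x => cases o <;> simp [pvStep, h, ih _ false, h2]

lemma min_if (b p : Int) : (if p < b then p else b) = min b p := by
  rw [min_def]; split_ifs <;> omega

lemma foldl_omin_some : ∀ (l : List Int) (a : Int),
    l.foldl (fun acc x => pvOMin acc (pvVal x)) (some a)
      = some (l.foldl (fun b x => min b (pvVal x)) a) := by
  intro l
  induction l with
  | nil => intro a; rfl
  | cons x t ih => intro a; simpa [pvOMin, min_if] using ih (min a (pvVal x))

lemma foldl_min_eq (f : Int → Int) : ∀ (l : List Int) (a c : Int), c ≤ a →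
    (∀ x ∈ l, c ≤ f x) → (a = c ∨ ∃ x ∈ l, f x = c) →
    l.foldl (fun b x => min b (f x)) a = c := by
  intro l
  induction l with
  | nil =>
    rintro a c _ _ (rfl | ⟨x, hx, _⟩)
    · rfl
    · simp at hx
  | cons x t ih =>
    intro a c hca hall hmem
    have hx : c ≤ f x := hall x (by simp)
    rw [List.foldl_cons]
    apply ih (min a (f x)) c (le_min hca hx) (fun y hy => hall y (by simp [hy]))
    rcases hmem with rfl | ⟨y, hy, hfy⟩
    · left; rw [min_def]; split_ifs <;> omega
    · rcases List.mem_cons.mp hy with rfl | hyt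
      · left; rw [min_def]; split_ifs <;> omega
      · right; exact ⟨y, hyt, hfy⟩

lemma nodup_all_eq {α : Type} (l : List α) (a : α) (hnd : l.Nodup) (hm : a ∈ l)
    (hall : ∀ x ∈ l, x = a) : l = [a] := by
  cases l with
  | nil => cases hm
  | cons b t =>
    have hb : b = a := hall b (by simp)
    subst hb
    cases t with
    | nil => rfl
    | cons c u =>
      have hc : c = b := hall c (by simp)
      rw [List.nodup_cons] at hnd
      exact absurd (show b ∈ c :: u by simp [hc.symm]) hnd.1

lemma main_eq (vals : List (Option Int)) : max_align vals = max_align_alt vals := by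
  rcases vals with _ | ⟨v0, rest⟩
  · rfl
  set vs := v0 :: rest with hvs
  have hlen : vs.length ≠ 0 := by simp [hvs]
  have hfst := fold_fst vs none true
  have hsnd := fold_snd vs none true
  rcases hst : vs.foldl pvStep (none, true) with ⟨s1, s2⟩
  rw [hst] at hfst hsnd
  dsimp only at hfst hsnd
  have halt : max_align_alt vs = (match (s1, s2) with
      | (none, _) => 0 | (some b, z) => if z then 0 else b) := by
    simp only [max_align_alt, hst]
  rcases hvl : vs.filterMap id with _ | ⟨x, t⟩
  · -- every element is None
    have hallnone : ∀ v ∈ vs, v = none := by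
      intro v hv
      rcases v with _ | y
      · rfl
      · have hmem : y ∈ vs.filterMap id := List.mem_filterMap.mpr ⟨some y, hv, rfl⟩
        rw [hvl] at hmem
        simp at hmem
    have hv0 : v0 = none := hallnone v0 (by simp [hvs])
    have hset : PySem.Set.ofList vs = [none] :=
      nodup_all_eq _ _ (PySem.Set.nodup_ofList vs)
        ((PySem.Set.mem_ofList _ _).mpr (hv0 ▸ List.mem_cons_self))
        (fun y hy => hallnone y ((PySem.Set.mem_ofList _ _).mp hy))
    have hs1 : s1 = none := by rw [hfst, hvl]; rfl
    rw [halt, hs1]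
    have hset' : (PySem.Set.ofList vs).length = 1 ∧ vs.head? = some none := by
      rw [hset]; simp [hvs, hv0]
    simp [max_align, hlen, hset'.1, hset'.2]
  · -- at least one non-None value x
    have hxmem : some x ∈ vs := by
      have : x ∈ vs.filterMap id := by rw [hvl]; simp
      rcases List.mem_filterMap.mp this with ⟨a, ha, hax⟩
      simpa [show a = some x from hax] using ha
    have hset : ¬ ((PySem.Set.ofList vs).length = 1 ∧ vs.head? = some none) := by
      rintro ⟨hl1, hh⟩
      have hv0 : v0 = none := by simpa [hvs] using hh
      obtain ⟨y, hy⟩ := List.length_eq_one_iff.mp hl1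
      have h1 : (none : Option Int) ∈ PySem.Set.ofList vs :=
        (PySem.Set.mem_ofList _ _).mpr (hv0 ▸ List.mem_cons_self)
      have h2 : some x ∈ PySem.Set.ofList vs := (PySem.Set.mem_ofList _ _).mpr hxmem
      rw [hy] at h1 h2
      simp at h1 h2
      exact absurd (h1.trans h2.symm) (by simp)
    have hs1 : s1 = some (t.foldl (fun b y => min b (pvVal y)) (pvVal x)) := by
      rw [hfst, hvl, List.foldl_cons]
      simpa [pvOMin] using foldl_omin_some t (pvVal x)
    by_cases hall0 : ∀ v ∈ vs, v = some 0
    · -- everything is literally 0: both return 0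
      have hz : pvOnlyZeros vs = true := (pvOnlyZeros_iff vs).mpr hall0
      have hs2 : s2 = true := by
        rw [hsnd, Bool.true_and, List.all_eq_true]
        intro v hv
        simp [hall0 v hv]
      rw [halt, hs1, hs2]
      simp [max_align, hlen, hset, hz]
    · -- main case: A's divisor loop = B's minimum of per-value valuations
      have hz : pvOnlyZeros vs = false := by
        rw [← Bool.not_eq_true, pvOnlyZeros_iff]
        exact hall0
      have hs2 : s2 = false := by
        rw [hsnd, Bool.true_and]
        rcases not_forall.mp hall0 with ⟨v, hv⟩
        rcases Classical.not_imp.mp hv with ⟨hvm, hvne⟩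
        rw [← Bool.not_eq_true, List.all_eq_true]
        intro hc
        exact hvne (by simpa using hc v hvm)
      have hA : max_align vs = pvMainLoop vs 1 7 := by
        simp [max_align, hlen, hset, hz]
      rw [hA, halt, hs1, hs2]
      simp only [Bool.false_eq_true, if_false]
      -- both sides now reduce under the chain of divisibility cases
      have key : ∀ c : Int, (∀ y ∈ x :: t, c ≤ pvVal y) → (∃ y ∈ x :: t, pvVal y = c) →
          t.foldl (fun b y => min b (pvVal y)) (pvVal x) = c := by
        intro c hallc ⟨y, hy, hyc⟩
        apply foldl_min_eq _ _ _ _ (hallc x (by simp)) (fun z hz => hallc z (by simp [hz]))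
        rcases List.mem_cons.mp hy with rfl | hyt
        · left; exact hyc
        · right; exact ⟨y, hyt, hyc⟩
      have hiff : ∀ d : Int, pvIsAligned vs d = true ↔ ∀ y ∈ x :: t, d ∣ y := by
        intro d; rw [pvIsAligned_iff, hvl]
      by_cases h2 : ∀ y ∈ x :: t, (2:Int) ∣ y
      case neg =>
        have hA2 : pvIsAligned vs 2 = false := by
          rw [← Bool.not_eq_true, hiff]; exact h2
        rcases not_forall.mp h2 with ⟨y, hy⟩
        rcases Classical.not_imp.mp hy with ⟨hym, hynd⟩
        rw [key 1 (fun z _ => by rw [pvVal_table]; split_ifs <;> omega)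
          ⟨y, hym, by rw [pvVal_table]; split_ifs <;> omega⟩]
        simp only [pvMainLoop]
        norm_num [hA2]
      case pos =>
      have hA2 : pvIsAligned vs 2 = true := (hiff 2).mpr h2
      by_cases h4 : ∀ y ∈ x :: t, (4:Int) ∣ y
      case neg =>
        have hA4 : pvIsAligned vs 4 = false := by
          rw [← Bool.not_eq_true, hiff]; exact h4
        rcases not_forall.mp h4 with ⟨y, hy⟩
        rcases Classical.not_imp.mp hy with ⟨hym, hynd⟩
        rw [key 2 (fun z hz => by have := h2 z hz; rw [pvVal_table]; split_ifs <;> omega)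
          ⟨y, hym, by have := h2 y hym; rw [pvVal_table]; split_ifs <;> omega⟩]
        simp only [pvMainLoop]
        norm_num [hA2, hA4]
      case pos =>
      have hA4 : pvIsAligned vs 4 = true := (hiff 4).mpr h4
      by_cases h8 : ∀ y ∈ x :: t, (8:Int) ∣ y
      case neg =>
        have hA8 : pvIsAligned vs 8 = false := by
          rw [← Bool.not_eq_true, hiff]; exact h8
        rcases not_forall.mp h8 with ⟨y, hy⟩
        rcases Classical.not_imp.mp hy with ⟨hym, hynd⟩
        rw [key 4 (fun z hz => by have := h4 z hz; rw [pvVal_table]; split_ifs <;> omega)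
          ⟨y, hym, by have := h4 y hym; rw [pvVal_table]; split_ifs <;> omega⟩]
        simp only [pvMainLoop]
        norm_num [hA2, hA4, hA8]
      case pos =>
      have hA8 : pvIsAligned vs 8 = true := (hiff 8).mpr h8
      by_cases h16 : ∀ y ∈ x :: t, (16:Int) ∣ y
      case neg =>
        have hA16 : pvIsAligned vs 16 = false := by
          rw [← Bool.not_eq_true, hiff]; exact h16
        rcases not_forall.mp h16 with ⟨y, hy⟩
        rcases Classical.not_imp.mp hy with ⟨hym, hynd⟩
        rw [key 8 (fun z hz => by have := h8 z hz; rw [pvVal_table]; split_ifs <;> omega)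
          ⟨y, hym, by have := h8 y hym; rw [pvVal_table]; split_ifs <;> omega⟩]
        simp only [pvMainLoop]
        norm_num [hA2, hA4, hA8, hA16]
      case pos =>
      have hA16 : pvIsAligned vs 16 = true := (hiff 16).mpr h16
      by_cases h32 : ∀ y ∈ x :: t, (32:Int) ∣ y
      case neg =>
        have hA32 : pvIsAligned vs 32 = false := by
          rw [← Bool.not_eq_true, hiff]; exact h32
        rcases not_forall.mp h32 with ⟨y, hy⟩
        rcases Classical.not_imp.mp hy with ⟨hym, hynd⟩
        rw [key 16 (fun z hz => by have := h16 z hz; rw [pvVal_table]; split_ifs <;> omega)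
          ⟨y, hym, by have := h16 y hym; rw [pvVal_table]; split_ifs <;> omega⟩]
        simp only [pvMainLoop]
        norm_num [hA2, hA4, hA8, hA16, hA32]
      case pos =>
      have hA32 : pvIsAligned vs 32 = true := (hiff 32).mpr h32
      by_cases h64 : ∀ y ∈ x :: t, (64:Int) ∣ y
      case neg =>
        have hA64 : pvIsAligned vs 64 = false := by
          rw [← Bool.not_eq_true, hiff]; exact h64
        rcases not_forall.mp h64 with ⟨y, hy⟩
        rcases Classical.not_imp.mp hy with ⟨hym, hynd⟩
        rw [key 32 (fun z hz => by have := h32 z hz; rw [pvVal_table]; split_ifs <;> omega)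
          ⟨y, hym, by have := h32 y hym; rw [pvVal_table]; split_ifs <;> omega⟩]
        simp only [pvMainLoop]
        norm_num [hA2, hA4, hA8, hA16, hA32, hA64]
      case pos =>
      have hA64 : pvIsAligned vs 64 = true := (hiff 64).mpr h64
      by_cases h128 : ∀ y ∈ x :: t, (128:Int) ∣ y
      case neg =>
        have hA128 : pvIsAligned vs 128 = false := by
          rw [← Bool.not_eq_true, hiff]; exact h128
        rcases not_forall.mp h128 with ⟨y, hy⟩
        rcases Classical.not_imp.mp hy with ⟨hym, hynd⟩
        rw [key 64 (fun z hz => by have := h64 z hz; rw [pvVal_table]; split_ifs <;> omega)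
          ⟨y, hym, by have := h64 y hym; rw [pvVal_table]; split_ifs <;> omega⟩]
        simp only [pvMainLoop]
        norm_num [hA2, hA4, hA8, hA16, hA32, hA64, hA128]
      case pos =>
      have hA128 : pvIsAligned vs 128 = true := (hiff 128).mpr h128
      rw [key 128 (fun z hz => by have := h128 z hz; rw [pvVal_table]; split_ifs <;> omega)
        ⟨x, by simp, by have := h128 x (by simp); rw [pvVal_table]; split_ifs <;> omega⟩]
      simp only [pvMainLoop]
      norm_num [hA2, hA4, hA8, hA16, hA32, hA64, hA128]

-- ===== VERDICT (by name: the statement is the Claim_ definition above) =====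
theorem max_align_spec : Claim_equal_max_align := by
  intro vals _
  unfold Spec_max_align
  exact main_eq vals
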